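-- pv_equiv track=rewrite | github.com/victor-henri/integra-app | modules/customer.py | __fields_treatment
-- ===== SOURCE A (Python) =====
-- def __fields_treatment(other_fields):
--
--     characters = ('a', 'b', 'c', 'd', 'e', 'f', 'g', 'h', 'i', 'j', 'k', 'l', 'm', 'n', 'o', 'p',
--                   'q', 'r', 's', 't', 'u', 'v', 'w', 'x', 'y', 'z', 'A', 'B', 'C', 'D', 'E', 'F',
--                   'G', 'H', 'I', 'J', 'K', 'L', 'M', 'N', 'O', 'P', 'Q', 'R', 'S', 'T', 'U', 'V',
--                   'W', 'X', 'Y', 'Z', '0', '1', '2', '3', '4', '5', '6', '7', '8', '9', ' ')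
--
--     for key, field in other_fields.items():
--
--         if field is None:
--             pass
--         else:
--             values = []
--
--             for caracter in field:
--                 if caracter in characters:
--                     values.append(caracter)
--
--             formatted_field = ''.join(values)
--             other_fields.update({key: formatted_field})
--
--     return other_fields
-- ===== SOURCE B (Python) =====
-- # B: instead of appending kept characters one by one, extract maximal runs of
-- # allowed characters by index jumps and join the run slices; builds a fresh dict
-- # (A mutates its argument in place; the return value is the same).
-- _ALLOWED = frozenset("abcdefghijklmnopqrstuvwxyz"
--                      "ABCDEFGHIJKLMNOPQRSTUVWXYZ"
--                      "0123456789 ")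
--
-- def _keep_runs(s):
--     pieces = []
--     i, n = 0, len(s)
--     while i < n:
--         if s[i] in _ALLOWED:
--             j = i + 1
--             while j < n and s[j] in _ALLOWED:
--                 j += 1
--             pieces.append(s[i:j])
--             i = j
--         else:
--             i += 1
--     return ''.join(pieces)
--
-- def __fields_treatment(other_fields):
--     return {key: (field if field is None else _keep_runs(field))
--             for key, field in other_fields.items()}
-- ===== Notes on version B (the rewrite author's own statement) =====
-- stated objective: alternative
-- what changed: Replaces A's per-character append loop over a whitelist tuple by a two-pointer scan that extracts maximal runs of allowed characters as slices and joins them, building a fresh dict by comprehension instead of mutating in place (the return value is the same).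
import Mathlib
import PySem

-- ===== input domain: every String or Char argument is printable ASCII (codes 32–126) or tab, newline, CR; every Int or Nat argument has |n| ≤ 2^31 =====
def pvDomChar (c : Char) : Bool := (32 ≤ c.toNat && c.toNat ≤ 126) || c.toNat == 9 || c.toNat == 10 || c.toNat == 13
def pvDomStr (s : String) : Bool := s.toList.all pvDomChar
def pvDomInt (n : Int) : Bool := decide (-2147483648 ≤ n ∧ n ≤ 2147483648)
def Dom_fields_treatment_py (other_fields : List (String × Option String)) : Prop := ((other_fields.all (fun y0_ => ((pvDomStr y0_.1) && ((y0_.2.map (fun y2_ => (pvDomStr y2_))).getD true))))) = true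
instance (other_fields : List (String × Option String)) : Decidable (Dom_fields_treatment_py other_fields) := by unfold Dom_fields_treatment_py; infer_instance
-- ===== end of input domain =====

-- B replaces A's in-place per-character append loop over a whitelist tuple by a
-- two-pointer scan extracting maximal runs of allowed characters, joined at the end
-- (alternative; A mutates its argument in Python, B returns a fresh dict — the
-- equivalence proved here is about the return value).


-- ===== PORT A =====
-- the `characters` whitelist tuple, in A's order
def pvChars : List Char :=
  ['a','b','c','d','e','f','g','h','i','j','k','l','m','n','o','p',
   'q','r','s','t','u','v','w','x','y','z','A','B','C','D','E','F',
   'G','H','I','J','K','L','M','N','O','P','Q','R','S','T','U','V',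
   'W','X','Y','Z','0','1','2','3','4','5','6','7','8','9',' ']

-- hand port of `other_fields.update({key: v})` on the assoc-list dict:
-- overwrite the first pair with this key in place (a fresh key would append; exact for Python dict.update of a single key)
def pvUpdateKey (l : List (String × Option String)) (k : String) (v : Option String) :
    List (String × Option String) :=
  match l with
  | [] => [(k, v)]
  | p :: rest => if p.1 = k then (k, v) :: rest else p :: pvUpdateKey rest k v

def fields_treatment_py (other_fields : List (String × Option String)) :
    List (String × Option String) :=
  other_fields.foldl
    (fun acc kv =>
      match kv.2 with
      | none => acc
      | some field =>
        let values := field.toList.foldl (fun vs c => if pvChars.contains c then vs ++ [c] else vs) []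
        pvUpdateKey acc kv.1 (some (String.ofList values)))
    other_fields

-- ===== PORT B =====
-- the frozenset `_ALLOWED` (built from the allowed-character string literal)
def pvAllowed : PySem.Set Char :=
  PySem.Set.ofList "abcdefghijklmnopqrstuvwxyzABCDEFGHIJKLMNOPQRSTUVWXYZ0123456789 ".toList

-- `_keep_runs`: skip the disallowed prefix, slice off the maximal allowed run,
-- continue on the remainder (B's two index loops = dropWhile/takeWhile on the remainder)
def pvKeepRuns (cs : List Char) : List (List Char) :=
  match h : cs.dropWhile (fun c => !(pvAllowed.contains c)) with
  | [] => []
  | c :: rest =>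
    (c :: rest.takeWhile (fun c => pvAllowed.contains c)) ::
      pvKeepRuns (rest.dropWhile (fun c => pvAllowed.contains c))
  termination_by cs.length
  decreasing_by
    have h1 := cs.length_dropWhile_le (fun c => !(pvAllowed.contains c))
    rw [h] at h1
    have h2 := rest.length_dropWhile_le (fun c => pvAllowed.contains c)
    simp only [List.length_cons] at h1
    omega

def fields_treatment_py_alt (other_fields : List (String × Option String)) :
    List (String × Option String) :=
  other_fields.map
    (fun kv => (kv.1, kv.2.map (fun s => String.ofList (pvKeepRuns s.toList).flatten)))

-- ===== PRECONDITION & SPEC =====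
-- Pre_ excludes assoc lists with duplicate keys: they do not encode any Python dict
-- (A's argument is a dict, which cannot have duplicate keys), so A's behaviour there is undefined.
def Pre_fields_treatment_py (other_fields : List (String × Option String)) : Prop :=
  (other_fields.map Prod.fst).Nodup
instance (other_fields : List (String × Option String)) : Decidable (Pre_fields_treatment_py other_fields) := by unfold Pre_fields_treatment_py; infer_instance

def pvWitness_fields_treatment_py : (List (String × Option String)) :=
  [("name", some "a-b c!"), ("note", none)]

def Spec_fields_treatment_py (other_fields : List (String × Option String)) (out : List (String × Option String)) : Prop := out = fields_treatment_py_alt other_fields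
instance (other_fields : List (String × Option String)) (out : List (String × Option String)) : Decidable (Spec_fields_treatment_py other_fields out) := by unfold Spec_fields_treatment_py; infer_instance

-- ===== CLAIM (what is proved, stated in full; the proofs are below) =====
def Claim_equal_fields_treatment_py : Prop := ∀ (other_fields : List (String × Option String)), Dom_fields_treatment_py other_fields → Pre_fields_treatment_py other_fields → Spec_fields_treatment_py other_fields (fields_treatment_py other_fields)

-- ===== LEMMAS AND PROOFS =====

-- A's whitelist list and B's frozenset hold exactly the same characters (same order, no duplicates)
set_option maxRecDepth 8192 in
theorem pvAllowed_eq_pvChars : pvAllowed = pvChars := by decide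

-- dropping the disallowed prefix does not change the filtered result
theorem pv_filter_dropWhile_not (p : Char → Bool) (cs : List Char) :
    (cs.dropWhile (fun c => !p c)).filter p = cs.filter p := by
  induction cs with
  | nil => rfl
  | cons c rest ih =>
    by_cases hc : p c = true
    · simp [hc]
    · simp only [Bool.not_eq_true] at hc
      simp [hc, ih]

-- the filtered result splits as the leading allowed run plus the filtered remainder
theorem pv_filter_split (p : Char → Bool) (cs : List Char) :
    cs.filter p = cs.takeWhile p ++ (cs.dropWhile p).filter p := by
  induction cs with
  | nil => rfl
  | cons c rest ih =>
    by_cases hc : p c = true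
    · simp [hc, ih]
    · simp only [Bool.not_eq_true] at hc
      simp [hc]

-- the head of a non-empty dropWhile result fails the dropped predicate
theorem pv_dropWhile_head (q : Char → Bool) (cs : List Char) (c : Char) (rest : List Char)
    (h : cs.dropWhile q = c :: rest) : q c = false := by
  induction cs with
  | nil => simp at h
  | cons x xs ih =>
    by_cases hq : q x = true
    · rw [List.dropWhile_cons, if_pos hq] at h
      exact ih h
    · rw [List.dropWhile_cons, if_neg hq] at h
      cases h
      simpa using hq

-- B's run extraction, flattened, is exactly the character filter
theorem pvKeepRuns_flatten (cs : List Char) :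
    (pvKeepRuns cs).flatten = cs.filter (fun c => pvAllowed.contains c) := by
  induction cs using pvKeepRuns.induct with
  | case1 cs h =>
    rw [pvKeepRuns]
    split
    · rw [← pv_filter_dropWhile_not (fun c => pvAllowed.contains c) cs, h]
      rfl
    · next c rest heq =>
      rw [h] at heq
      cases heq
  | case2 cs c rest h ih =>
    rw [pvKeepRuns]
    split
    · next heq =>
      rw [h] at heq
      cases heq
    · next c' rest' heq =>
      rw [h] at heq
      injection heq with h1 h2
      subst h1
      subst h2
      simp only [List.flatten_cons, ih]
      have hc : pvAllowed.contains c = true := by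
        have := pv_dropWhile_head _ cs c rest h
        simpa using this
      rw [← pv_filter_dropWhile_not (fun c => pvAllowed.contains c) cs, h,
        List.filter_cons, if_pos hc, pv_filter_split (fun c => pvAllowed.contains c) rest]
      simp

-- A's inner loop builds exactly the character filter
theorem pv_inner_eq_filter (cs : List Char) :
    cs.foldl (fun vs c => if pvChars.contains c then vs ++ [c] else vs) []
      = cs.filter (fun c => pvChars.contains c) := by
  rw [PySem.List.foldl_append_if]
  simp only [List.nil_append, List.map_id']

-- updating a key absent from the prefix overwrites the matching pair in place
theorem pvUpdateKey_middle (pre : List (String × Option String)) (k : String)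
    (old v : Option String) (rest : List (String × Option String))
    (h : k ∉ pre.map Prod.fst) :
    pvUpdateKey (pre ++ (k, old) :: rest) k v = pre ++ (k, v) :: rest := by
  induction pre with
  | nil => simp [pvUpdateKey]
  | cons p ps ih =>
    simp only [List.map_cons, List.mem_cons] at h
    rw [not_or] at h
    simp only [List.cons_append, pvUpdateKey, if_neg (Ne.symm h.1)]
    rw [ih h.2]

-- the loop invariant: processing `l` on top of an already-processed prefix `pre`
theorem pv_foldl_inv (l pre : List (String × Option String))
    (hdisj : ∀ kv ∈ l, kv.1 ∉ pre.map Prod.fst)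
    (hnd : (l.map Prod.fst).Nodup) :
    l.foldl
      (fun acc kv =>
        match kv.2 with
        | none => acc
        | some field =>
          let values := field.toList.foldl (fun vs c => if pvChars.contains c then vs ++ [c] else vs) []
          pvUpdateKey acc kv.1 (some (String.ofList values)))
      (pre ++ l)
    = pre ++ l.map (fun kv => (kv.1, kv.2.map (fun s => String.ofList (s.toList.filter (fun c => pvChars.contains c))))) := by
  induction l generalizing pre with
  | nil => simp
  | cons kv rest ih =>
    obtain ⟨k, fv⟩ := kv
    simp only [List.map_cons, List.nodup_cons] at hnd
    cases fv with
    | none =>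
      have hdisj' : ∀ p ∈ rest, p.1 ∉ ((pre ++ [((k : String), (none : Option String))]).map Prod.fst) := by
        intro p hp
        simp only [List.map_append, List.map_cons, List.map_nil, List.mem_append, List.mem_cons,
          List.not_mem_nil, or_false]
        rintro (h | h)
        · exact hdisj p (List.mem_cons_of_mem _ hp) h
        · exact hnd.1 (h ▸ List.mem_map_of_mem hp)
      have := ih (pre ++ [((k : String), (none : Option String))]) hdisj' hnd.2
      simpa [List.append_assoc] using this
    | some field =>
      have hdisj' : ∀ p ∈ rest, p.1 ∉ ((pre ++ [((k : String), some (String.ofList (field.toList.filter (fun c => pvChars.contains c))))]).map Prod.fst) := by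
        intro p hp
        simp only [List.map_append, List.map_cons, List.map_nil, List.mem_append, List.mem_cons,
          List.not_mem_nil, or_false]
        rintro (h | h)
        · exact hdisj p (List.mem_cons_of_mem _ hp) h
        · exact hnd.1 (h ▸ List.mem_map_of_mem hp)
      simp only [List.foldl_cons]
      rw [pvUpdateKey_middle pre k (some field) _ rest (hdisj (k, some field) List.mem_cons_self)]
      rw [pv_inner_eq_filter]
      have := ih (pre ++ [((k : String), some (String.ofList (field.toList.filter (fun c => pvChars.contains c))))]) hdisj' hnd.2
      simpa [List.append_assoc] using this

-- ===== VERDICT (by name: the statement is the Claim_ definition above) =====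
theorem fields_treatment_py_spec : Claim_equal_fields_treatment_py := by
  intro l _ hpre
  show fields_treatment_py l = fields_treatment_py_alt l
  unfold fields_treatment_py fields_treatment_py_alt
  have hA := pv_foldl_inv l [] (by simp) hpre
  simp only [List.nil_append] at hA
  rw [hA]
  refine List.map_congr_left ?_
  intro kv _
  cases kv.2 <;> simp [pvKeepRuns_flatten, pvAllowed_eq_pvChars]
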